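-- pv_equiv track=rewrite | github.com/Mato098/Generative-design | final_project/sprites/generator.py | parse_sprite_grid
-- ===== SOURCE A (Python) =====
-- from typing import Dict, List, Optional, Tuple, Any
--
-- def parse_sprite_grid(grid_text: str) -> List[List[str]]:
--     """Parse a text grid into a 2D pixel array."""
--     lines = grid_text.strip().split('\n')
--
--     # Ensure we have exactly 16 lines
--     if len(lines) < 16:
--         lines.extend(['.'] * (16 - len(lines)))
--     elif len(lines) > 16:
--         lines = lines[:16]
--
--     pixel_grid = []
--     for line in lines:
--         # Ensure each line is exactly 16 characters
--         if len(line) < 16: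
--             line += '.' * (16 - len(line))
--         elif len(line) > 16:
--             line = line[:16]
--
--         # Convert characters to symbols
--         row = list(line)
--         pixel_grid.append(row)
--
--     return pixel_grid
-- ===== SOURCE B (Python) =====
-- def parse_sprite_grid(grid_text: str):
--     """Parse a text grid into a 2D pixel array (allocate-then-copy)."""
--     grid = [['.'] * 16 for _ in range(16)]
--     lines = grid_text.strip().split('\n')
--     for i in range(min(16, len(lines))):
--         line = lines[i]
--         for j in range(min(16, len(line))):
--             grid[i][j] = line[j]
--     return grid
-- ===== Notes on version B (the rewrite author's own statement) =====
-- stated objective: alternative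
-- what changed: B pre-allocates the final 16x16 grid already filled with the pad character and copies in only the characters actually present (bounded by min(16, ...)), instead of A's truncate-or-pad-each-line-then-append flow.
import Mathlib
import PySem

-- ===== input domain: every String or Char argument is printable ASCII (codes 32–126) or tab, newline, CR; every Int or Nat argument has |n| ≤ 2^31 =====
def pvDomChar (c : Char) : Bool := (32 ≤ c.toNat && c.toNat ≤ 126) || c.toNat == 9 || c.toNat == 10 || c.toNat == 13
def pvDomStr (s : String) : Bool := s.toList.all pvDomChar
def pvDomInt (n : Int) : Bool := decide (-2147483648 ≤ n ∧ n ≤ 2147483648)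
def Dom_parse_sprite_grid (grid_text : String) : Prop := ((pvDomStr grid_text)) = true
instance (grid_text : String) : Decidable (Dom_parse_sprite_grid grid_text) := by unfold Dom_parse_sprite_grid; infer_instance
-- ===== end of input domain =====

-- B pre-allocates the 16x16 grid already filled with the pad character and copies in the
-- characters present, instead of A's truncate-or-pad-each-line-then-append flow; same cost,
-- different decomposition.

-- ===== PORT A =====
def parse_sprite_grid (grid_text : String) : List (List String) :=
  let lines0 := PySem.Chars.splitOn (PySem.Chars.strip grid_text.toList) ['\n']
  let lines := if lines0.length < 16 then lines0 ++ List.replicate (16 - lines0.length) ['.']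
    else if lines0.length > 16 then PySem.List.slice lines0 none (some 16) else lines0
  lines.foldl (fun pixel_grid line =>
    let line' := if line.length < 16 then line ++ List.replicate (16 - line.length) '.'
      else if line.length > 16 then PySem.List.slice line none (some 16) else line
    pixel_grid ++ [line'.map (fun c => String.mk [c])]) []

-- ===== PORT B =====
def parse_sprite_grid_alt (grid_text : String) : List (List String) :=
  let lines := PySem.Chars.splitOn (PySem.Chars.strip grid_text.toList) ['\n']
  let grid0 : List (List String) := List.replicate 16 (List.replicate 16 ".")
  (List.range (min 16 lines.length)).foldl
    (fun grid i =>
      let line := lines.getD i []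
      grid.set i ((List.range (min 16 line.length)).foldl
        (fun row j => row.set j (String.mk [line.getD j '.'])) (grid.getD i [])))
    grid0

-- ===== PRECONDITION & SPEC =====
def Spec_parse_sprite_grid (grid_text : String) (out : List (List String)) : Prop := out = parse_sprite_grid_alt grid_text
instance (grid_text : String) (out : List (List String)) : Decidable (Spec_parse_sprite_grid grid_text out) := by unfold Spec_parse_sprite_grid; infer_instance

-- ===== CLAIM (what is proved, stated in full; the proofs are below) =====
def Claim_equal_parse_sprite_grid : Prop := ∀ (grid_text : String), Dom_parse_sprite_grid grid_text → Spec_parse_sprite_grid grid_text (parse_sprite_grid grid_text)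

-- ===== LEMMAS AND PROOFS =====

-- two lists with the same length and pointwise-equal getD are equal
lemma pv_ext_of_getD {α : Type} (d : α) {a b : List α} (hl : a.length = b.length)
    (h : ∀ k, a.getD k d = b.getD k d) : a = b := by
  apply List.ext_getElem hl
  intro i h1 h2
  have := h i
  simpa [List.getD_eq_getElem?_getD, List.getElem?_eq_getElem, h1, h2] using this

-- getD of set, as one equation
lemma pv_getD_set {α : Type} (l : List α) (i k : Nat) (a d : α) :
    (l.set i a).getD k d = if i = k ∧ k < l.length then a else l.getD k d := by
  rw [List.getD_eq_getElem?_getD, List.getElem?_set, List.getD_eq_getElem?_getD]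
  by_cases h1 : i = k
  · subst h1
    by_cases h2 : i < l.length
    · simp [h2]
    · simp [h2, List.getElem?_eq_none (by omega : l.length ≤ i)]
  · simp [h1]

-- characterization of a `set`-based index loop (B's loops): length preserved, entries overwritten below n
lemma pv_foldl_set {α : Type} (F : Nat → α → α) (d : α) :
    ∀ (n : Nat) (g0 : List α), n ≤ g0.length →
      (((List.range n).foldl (fun g i => g.set i (F i (g.getD i d))) g0).length = g0.length ∧
       ∀ k, ((List.range n).foldl (fun g i => g.set i (F i (g.getD i d))) g0).getD k d
            = if k < n then F k (g0.getD k d) else g0.getD k d) := by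
  intro n
  induction n with
  | zero => intro g0 _; simp
  | succ n ih =>
    intro g0 hn
    have hn' : n ≤ g0.length := Nat.le_of_succ_le hn
    obtain ⟨hlen, hget⟩ := ih g0 hn'
    rw [List.range_succ, List.foldl_append, List.foldl_cons, List.foldl_nil]
    have hgn : ((List.range n).foldl (fun g i => g.set i (F i (g.getD i d))) g0).getD n d
        = g0.getD n d := by
      rw [hget]; simp
    constructor
    · rw [List.length_set]; exact hlen
    · intro k
      rw [pv_getD_set, hgn, hget, hlen]
      by_cases h1 : n = k
      · subst h1
        have h2 : n < g0.length := by omega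
        simp [h2]
      · by_cases h3 : k < n
        · have h2 : k < n + 1 := by omega
          simp [h1, h3, h2]
        · have h4 : ¬ k < n + 1 := by omega
          simp [h1, h3, h4]

-- getD with any default, at an in-range index
lemma pv_getD_in {α : Type} (l : List α) (k : Nat) (h : k < l.length) (d d' : α) :
    l.getD k d = l.getD k d' := by
  simp [List.getD_eq_getElem?_getD, List.getElem?_eq_getElem h]

-- getD through map, at an in-range index
lemma pv_getD_map {α β : Type} (f : α → β) (l : List α) (k : Nat) (h : k < l.length)
    (d : α) (d' : β) : (l.map f).getD k d' = f (l.getD k d) := by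
  simp [List.getD_eq_getElem?_getD, List.getElem?_eq_getElem h]

-- A's pad-or-truncate-to-16 step, characterized (used for the line list and for each line)
lemma pv_pad16_len {α : Type} (l : List α) (d : α) :
    (if l.length < 16 then l ++ List.replicate (16 - l.length) d
      else if l.length > 16 then PySem.List.slice l none (some 16) else l).length = 16 := by
  split_ifs with h1 h2
  · simp; omega
  · rw [PySem.List.slice_to l (by norm_num)]
    simp; omega
  · omega

lemma pv_pad16_getD {α : Type} (l : List α) (d : α) (k : Nat) (hk : k < 16) :
    (if l.length < 16 then l ++ List.replicate (16 - l.length) d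
      else if l.length > 16 then PySem.List.slice l none (some 16) else l).getD k d
      = if k < l.length then l.getD k d else d := by
  by_cases h1 : l.length < 16
  · rw [if_pos h1, List.getD_eq_getElem?_getD, List.getElem?_append]
    by_cases hkl : k < l.length
    · rw [if_pos hkl, if_pos hkl, List.getD_eq_getElem?_getD]
    · rw [if_neg hkl, if_neg hkl, List.getElem?_replicate,
        if_pos (by omega : k - l.length < 16 - l.length), Option.getD_some]
  · rw [if_neg h1]
    have hkl : k < l.length := by omega
    by_cases h2 : l.length > 16
    · rw [if_pos h2, PySem.List.slice_to l (by norm_num), if_pos hkl,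
        List.getD_eq_getElem?_getD, List.getElem?_take,
        if_pos (by omega : k < (16 : Int).toNat), List.getD_eq_getElem?_getD]
    · rw [if_neg h2, if_pos hkl]

-- getD of range / replicate at an in-range index
lemma pv_getD_range (n k : Nat) (h : k < n) : (List.range n).getD k 0 = k := by
  rw [List.getD_eq_getElem?_getD, List.getElem?_range h]; rfl

lemma pv_getD_replicate {α : Type} (n k : Nat) (h : k < n) (x d : α) :
    (List.replicate n x).getD k d = x := by
  rw [List.getD_eq_getElem?_getD, List.getElem?_replicate, if_pos h, Option.getD_some]

-- the value both programs put at cell (i, j) of the output, given the split lines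
def pvCell (line : List Char) (j : Nat) : String :=
  if j < line.length then String.mk [line.getD j '.'] else "."

-- A's per-line padding produces the length-16 row of pvCell values
lemma pv_row_A (line : List Char) :
    (if line.length < 16 then line ++ List.replicate (16 - line.length) '.'
      else if line.length > 16 then PySem.List.slice line none (some 16) else line).map
        (fun c => String.mk [c])
      = (List.range 16).map (fun j => pvCell line j) := by
  apply pv_ext_of_getD "."
  · rw [List.length_map, pv_pad16_len, List.length_map, List.length_range]
  · intro k
    by_cases hk : k < 16
    · have hkp : k < (if line.length < 16 then line ++ List.replicate (16 - line.length) '.'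
          else if line.length > 16 then PySem.List.slice line none (some 16) else line).length := by
        rw [pv_pad16_len]; exact hk
      rw [pv_getD_map _ _ k hkp '.' ".", pv_pad16_getD line '.' k hk,
        pv_getD_map _ _ k (by simpa using hk) 0 ".", pv_getD_range 16 k hk]
      unfold pvCell
      by_cases hj : k < line.length
      · simp [hj]
      · simp only [if_neg hj]
        decide
    · have h16 : (16 : Nat) ≤ k := by omega
      rw [List.getD_eq_getElem?_getD, List.getD_eq_getElem?_getD,
        List.getElem?_eq_none (by rw [List.length_map, pv_pad16_len]; exact h16),
        List.getElem?_eq_none (by rw [List.length_map, List.length_range]; exact h16)]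

-- B's inner loop produces the same row
lemma pv_row_B (line : List Char) :
    (List.range (min 16 line.length)).foldl
        (fun row j => row.set j (String.mk [line.getD j '.'])) (List.replicate 16 ".")
      = (List.range 16).map (fun j => pvCell line j) := by
  obtain ⟨hlen, hget⟩ := pv_foldl_set (fun j (_ : String) => String.mk [line.getD j '.']) "."
    (min 16 line.length) (List.replicate 16 ".") (by simp)
  apply pv_ext_of_getD "."
  · rw [hlen]; simp
  · intro k
    rw [hget]
    by_cases hk : k < 16
    · rw [pv_getD_map _ _ k (by simpa using hk) 0 ".", pv_getD_range 16 k hk]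
      unfold pvCell
      by_cases hj : k < line.length
      · have h1 : k < min 16 line.length := by omega
        simp [h1, hj]
      · have h1 : ¬ k < min 16 line.length := by omega
        rw [if_neg h1, if_neg hj, pv_getD_replicate 16 k hk]
    · have h16 : (16 : Nat) ≤ k := by omega
      have h1 : ¬ k < min 16 line.length := by omega
      rw [if_neg h1, List.getD_eq_getElem?_getD, List.getD_eq_getElem?_getD,
        List.getElem?_eq_none (by simpa using h16),
        List.getElem?_eq_none (by rw [List.length_map, List.length_range]; exact h16)]

-- the main equality, stated over the split lines (let-free; definitionally the two port bodies)
lemma pv_main (L : List (List Char)) :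
    (if L.length < 16 then L ++ List.replicate (16 - L.length) ['.']
      else if L.length > 16 then PySem.List.slice L none (some 16) else L).foldl
      (fun pixel_grid line =>
        pixel_grid ++ [(if line.length < 16 then line ++ List.replicate (16 - line.length) '.'
          else if line.length > 16 then PySem.List.slice line none (some 16) else line).map
            (fun c => String.mk [c])]) []
    = (List.range (min 16 L.length)).foldl
        (fun grid i =>
          grid.set i ((List.range (min 16 (L.getD i []).length)).foldl
            (fun row j => row.set j (String.mk [(L.getD i []).getD j '.'])) (grid.getD i [])))
        (List.replicate 16 (List.replicate 16 ".")) := by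
  obtain ⟨hlen, hget⟩ := pv_foldl_set
    (fun i (r : List String) => (List.range (min 16 (L.getD i []).length)).foldl
      (fun row j => row.set j (String.mk [(L.getD i []).getD j '.'])) r)
    ([] : List String) (min 16 L.length) (List.replicate 16 (List.replicate 16 "."))
    (by simp)
  rw [PySem.List.foldl_append_singleton_eq_map, List.nil_append]
  apply pv_ext_of_getD ([] : List String)
  · rw [List.length_map, pv_pad16_len _ (['.'] : List Char), hlen, List.length_replicate]
  · intro k
    rw [hget]
    by_cases hk : k < 16
    · have hkp : k < (if L.length < 16 then L ++ List.replicate (16 - L.length) ['.']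
          else if L.length > 16 then PySem.List.slice L none (some 16) else L).length := by
        rw [pv_pad16_len]; exact hk
      rw [pv_getD_map _ _ k hkp ['.'] ([] : List String), pv_pad16_getD L ['.'] k hk]
      have hg0 : (List.replicate 16 (List.replicate 16 ".")).getD k ([] : List String)
          = List.replicate 16 "." := by
        exact pv_getD_replicate 16 k hk _ _
      by_cases hkL : k < L.length
      · have hmin : k < min 16 L.length := by omega
        rw [if_pos hkL, if_pos hmin, hg0,
          pv_getD_in L k hkL ['.'] [], pv_row_A, pv_row_B]
      · have hmin : ¬ k < min 16 L.length := by omega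
        rw [if_neg hkL, if_neg hmin, hg0, pv_row_A]
        decide
    · have h16 : (16 : Nat) ≤ k := by omega
      have hmin : ¬ k < min 16 L.length := by omega
      rw [if_neg hmin, List.getD_eq_getElem?_getD, List.getD_eq_getElem?_getD,
        List.getElem?_eq_none (by rw [List.length_map, pv_pad16_len]; exact h16),
        List.getElem?_eq_none (by rw [List.length_replicate]; exact h16)]

-- ===== VERDICT (by name: the statement is the Claim_ definition above) =====
theorem parse_sprite_grid_spec : Claim_equal_parse_sprite_grid := by
  intro s _
  unfold Spec_parse_sprite_grid parse_sprite_grid parse_sprite_grid_alt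
  exact pv_main (PySem.Chars.splitOn (PySem.Chars.strip s.toList) ['\n'])
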